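-- pv_equiv track=rewrite | github.com/Wewoll/TIC | examen/examen_unidad2_PaniaguaLucas.py | genMatrizOcurrencias
-- ===== SOURCE A (Python) =====
-- def genAlfabeto(cadena):
--     alfabeto = []
--     for simbolo in cadena:
--         if simbolo not in alfabeto:
--             alfabeto.append(simbolo)
--     alfabeto.sort()
--     return alfabeto
--
-- def genMatrizOcurrencias(cadena):
--     alfabeto = genAlfabeto(cadena)
--     N = len(alfabeto)
--     matriz_ocurrencias = [[0 for _ in range(N)] for _ in range(N)]
--
--     for i in range(len(cadena) - 1):
--         origen = alfabeto.index(cadena[i])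
--         destino = alfabeto.index(cadena[i + 1])
--         matriz_ocurrencias[origen][destino] += 1
--
--     return matriz_ocurrencias
-- ===== SOURCE B (Python) =====
-- def genMatrizOcurrencias(cadena):
--     alfabeto = sorted(set(cadena))
--     trans = {}
--     for par in zip(cadena, cadena[1:]):
--         trans[par] = trans.get(par, 0) + 1
--     return [[trans.get((a, b), 0) for b in alfabeto] for a in alfabeto]
-- ===== Notes on version B (the rewrite author's own statement) =====
-- stated objective: faster
-- what changed: B first aggregates adjacent-pair counts into a dict in one linear pass over zip(cadena, cadena[1:]) (no list.index calls), then builds the matrix in a single nested comprehension reading that dict, instead of A's in-place cell increments driven by two O(N) list.index scans per character.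
import Mathlib
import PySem

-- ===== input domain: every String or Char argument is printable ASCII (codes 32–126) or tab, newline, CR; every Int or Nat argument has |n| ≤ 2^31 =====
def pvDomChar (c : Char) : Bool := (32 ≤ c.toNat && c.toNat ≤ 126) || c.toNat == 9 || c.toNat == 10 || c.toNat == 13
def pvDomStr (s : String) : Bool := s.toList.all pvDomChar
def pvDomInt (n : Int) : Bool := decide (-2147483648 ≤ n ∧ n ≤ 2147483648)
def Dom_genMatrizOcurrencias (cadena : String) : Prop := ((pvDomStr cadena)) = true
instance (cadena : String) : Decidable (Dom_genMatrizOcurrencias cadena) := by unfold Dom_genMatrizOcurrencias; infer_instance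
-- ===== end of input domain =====

-- B replaces A's per-transition list.index scans and in-place increments by one linear
-- pass building a pair-count dict, then a nested comprehension over the sorted alphabet.

-- ===== PORT A =====
def genAlfabeto (cadena : String) : List Char :=
  PySem.List.sorted
    (cadena.toList.foldl (fun alfabeto simbolo =>
      if alfabeto.contains simbolo then alfabeto else alfabeto ++ [simbolo]) [])
    (fun x => x) false

def genMatrizOcurrencias (cadena : String) : List (List Int) :=
  let alfabeto := genAlfabeto cadena
  let N : Nat := alfabeto.length
  let matriz0 := (PySem.List.pyRange 0 (N : Int) 1).map
    (fun _ => (PySem.List.pyRange 0 (N : Int) 1).map (fun _ => (0 : Int)))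
  (PySem.List.pyRange 0 ((cadena.toList.length : Int) - 1) 1).foldl
    (fun matriz i =>
      let origen := (PySem.List.index? alfabeto (PySem.List.pyGetD cadena.toList i ' ')).getD 0
      let destino := (PySem.List.index? alfabeto (PySem.List.pyGetD cadena.toList (i + 1) ' ')).getD 0
      matriz.modify origen (fun fila => fila.modify destino (· + 1)))
    matriz0

-- ===== PORT B =====
def genMatrizOcurrencias_alt (cadena : String) : List (List Int) :=
  let s := cadena.toList
  let alfabeto := PySem.List.sorted (PySem.Set.ofList s) (fun x => x) false
  let trans := (s.zip (s.drop 1)).foldl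
    (fun d par => d.modify par 0 (· + 1)) (PySem.Dict.empty : PySem.Dict (Char × Char) Int)
  alfabeto.map (fun a => alfabeto.map (fun b => trans.getD (a, b) 0))

-- ===== PRECONDITION & SPEC =====
def Spec_genMatrizOcurrencias (cadena : String) (out : List (List Int)) : Prop := out = genMatrizOcurrencias_alt cadena
instance (cadena : String) (out : List (List Int)) : Decidable (Spec_genMatrizOcurrencias cadena out) := by unfold Spec_genMatrizOcurrencias; infer_instance

-- ===== CLAIM (what is proved, stated in full; the proofs are below) =====
def Claim_equal_genMatrizOcurrencias : Prop := ∀ (cadena : String), Dom_genMatrizOcurrencias cadena → Spec_genMatrizOcurrencias cadena (genMatrizOcurrencias cadena)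

-- ===== LEMMAS AND PROOFS =====

-- the shared sorted alphabet
def pvAlf (cadena : String) : List Char :=
  PySem.List.sorted (PySem.Set.ofList cadena.toList) (fun x => x) false

-- A's alfabeto.index, totalised as in the port
def pvIdx (alf : List Char) (c : Char) : Nat := (PySem.List.index? alf c).getD 0

-- the matrix read off a pair-count dict
def pvMk (alf : List Char) (d : PySem.Dict (Char × Char) Int) : List (List Int) :=
  alf.map (fun a => alf.map (fun b => d.getD (a, b) 0))

lemma pvAlf_nodup (cadena : String) : (pvAlf cadena).Nodup :=
  (PySem.List.sorted_ofList_pairwise_lt cadena.toList).imp (fun h => ne_of_lt h)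

lemma mem_pvAlf {cadena : String} {c : Char} : c ∈ pvAlf cadena ↔ c ∈ cadena.toList := by
  simp [pvAlf]

lemma genAlfabeto_eq (cadena : String) : genAlfabeto cadena = pvAlf cadena := rfl

lemma index?_eq_some_idx {alf : List Char} {c : Char} (h : c ∈ alf) :
    PySem.List.index? alf c = some (pvIdx alf c) := by
  rcases Option.isSome_iff_exists.mp ((PySem.List.index?_isSome_iff alf c).mpr h) with ⟨k, hk⟩
  unfold pvIdx
  rw [hk]
  rfl

lemma pvIdx_lt {alf : List Char} {c : Char} (h : c ∈ alf) : pvIdx alf c < alf.length := by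
  rcases PySem.List.getElem_of_index?_eq_some (index?_eq_some_idx h) with ⟨hk, _, _⟩
  exact hk

lemma getElem_pvIdx {alf : List Char} {c : Char} (h : c ∈ alf) :
    alf[pvIdx alf c]'(pvIdx_lt h) = c := by
  rcases PySem.List.getElem_of_index?_eq_some (index?_eq_some_idx h) with ⟨hk, he, _⟩
  exact he

lemma getElem_eq_iff_idx {alf : List Char} (hn : alf.Nodup) {c : Char} (h : c ∈ alf)
    {r : Nat} (hr : r < alf.length) : alf[r] = c ↔ r = pvIdx alf c := by
  constructor
  · intro he
    have := getElem_pvIdx h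
    exact (List.Nodup.getElem_inj_iff hn).mp (by rw [he, this])
  · intro he; subst he; exact getElem_pvIdx h

lemma step_eq {alf : List Char} (hn : alf.Nodup) {a b : Char} (ha : a ∈ alf) (hb : b ∈ alf)
    (d : PySem.Dict (Char × Char) Int) :
    (pvMk alf d).modify (pvIdx alf a) (fun fila => fila.modify (pvIdx alf b) (· + 1))
      = pvMk alf (d.modify (a, b) 0 (· + 1)) := by
  apply List.ext_getElem
  · simp [pvMk]
  · intro r h1 h2
    rw [List.getElem_modify]
    simp only [pvMk, List.getElem_map] at h1 h2 ⊢
    have hr : r < alf.length := by simpa [pvMk] using h2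
    by_cases hra : pvIdx alf a = r
    · subst hra
      rw [if_pos rfl]
      have halfr : alf[pvIdx alf a] = a := getElem_pvIdx ha
      apply List.ext_getElem
      · simp
      · intro c hc1 hc2
        rw [List.getElem_modify]
        simp only [List.getElem_map] at hc1 hc2 ⊢
        have hc : c < alf.length := by simpa using hc2
        by_cases hcb : pvIdx alf b = c
        · subst hcb
          rw [if_pos rfl]
          have halfc : alf[pvIdx alf b] = b := getElem_pvIdx hb
          simp only [halfr, halfc]
          exact (PySem.Dict.getD_modify_self d (a, b) 0 (· + 1)).symm
        · rw [if_neg hcb]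
          have hne : (alf[pvIdx alf a], alf[c]) ≠ (a, b) := by
            intro hkey
            apply hcb
            have hb' : alf[c] = b := congrArg Prod.snd hkey
            exact ((getElem_eq_iff_idx hn hb hc).mp hb').symm
          exact (PySem.Dict.getD_modify_of_ne d 0 (· + 1) hne).symm
    · rw [if_neg hra]
      have hra' : alf[r] ≠ a := fun he => hra ((getElem_eq_iff_idx hn ha hr).mp he).symm
      apply List.map_congr_left
      intro x _
      have hne : (alf[r], x) ≠ (a, b) := fun hkey => hra' (congrArg Prod.fst hkey)
      exact (PySem.Dict.getD_modify_of_ne d 0 (· + 1) hne).symm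

lemma fold_eq {alf : List Char} (hn : alf.Nodup) (P : List (Char × Char))
    (hP : ∀ p ∈ P, p.1 ∈ alf ∧ p.2 ∈ alf) (d : PySem.Dict (Char × Char) Int) :
    P.foldl (fun m p => m.modify (pvIdx alf p.1) (fun fila => fila.modify (pvIdx alf p.2) (· + 1)))
        (pvMk alf d)
      = pvMk alf (P.foldl (fun d p => d.modify p 0 (· + 1)) d) := by
  induction P generalizing d with
  | nil => rfl
  | cons p t ih =>
    simp only [List.foldl_cons]
    rw [step_eq hn (hP p (List.mem_cons_self)).1 (hP p (List.mem_cons_self)).2]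
    exact ih (fun q hq => hP q (List.mem_cons_of_mem _ hq)) _

lemma pairs_eq (s : List Char) :
    (List.range (s.length - 1)).map (fun k => (s.getD k ' ', s.getD (k + 1) ' '))
      = s.zip (s.drop 1) := by
  apply List.ext_getElem
  · simp
  · intro k h1 h2
    simp only [List.getElem_map, List.getElem_range, List.getElem_zip, List.getElem_drop]
    have hk : k < s.length - 1 := by simpa using h1
    have hk1 : k < s.length := by omega
    have hk2 : k + 1 < s.length := by omega
    rw [List.getD_eq_getElem s ' ' hk1, List.getD_eq_getElem s ' ' hk2]
    have h1k : 1 + k = k + 1 := Nat.add_comm 1 k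
    simp only [h1k]

lemma loop_eq (s : List Char) (f : List (List Int) → Char → Char → List (List Int))
    (init : List (List Int)) :
    (PySem.List.pyRange 0 ((s.length : Int) - 1) 1).foldl
        (fun m i => f m (PySem.List.pyGetD s i ' ') (PySem.List.pyGetD s (i + 1) ' ')) init
      = (s.zip (s.drop 1)).foldl (fun m p => f m p.1 p.2) init := by
  rw [PySem.List.pyRange_one, List.foldl_map, ← pairs_eq s, List.foldl_map]
  have hlen : (((s.length : Int) - 1) - 0).toNat = s.length - 1 := by omega
  rw [hlen]
  apply PySem.List.foldl_congr_mem
  intro m k _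
  have h1 : ((0 : Int) + (k : Int)) = (k : Int) := by ring
  have h2 : ((k : Int) + 1) = ((k + 1 : Nat) : Int) := by push_cast; ring
  rw [h1, h2, PySem.List.pyGetD_natCast, PySem.List.pyGetD_natCast]

lemma zero_eq (alf : List Char) :
    (PySem.List.pyRange 0 (alf.length : Int) 1).map
        (fun _ => (PySem.List.pyRange 0 (alf.length : Int) 1).map (fun _ => (0 : Int)))
      = pvMk alf PySem.Dict.empty := by
  simp only [pvMk, PySem.Dict.getD_empty]
  rw [List.map_const', List.map_const', List.map_const', List.map_const']
  congr 1 <;> simp [PySem.List.length_pyRange_one]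

-- ===== VERDICT (by name: the statement is the Claim_ definition above) =====
theorem genMatrizOcurrencias_spec : Claim_equal_genMatrizOcurrencias := by
  intro cadena _
  unfold Spec_genMatrizOcurrencias genMatrizOcurrencias genMatrizOcurrencias_alt
  simp only [genAlfabeto_eq]
  rw [zero_eq (pvAlf cadena)]
  simp only [show ∀ (alf : List Char) (c : Char),
    (PySem.List.index? alf c).getD 0 = pvIdx alf c from fun _ _ => rfl]
  rw [loop_eq cadena.toList
    (fun m a b => m.modify (pvIdx (pvAlf cadena) a) (fun fila => fila.modify (pvIdx (pvAlf cadena) b) (· + 1)))]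
  rw [fold_eq (pvAlf_nodup cadena) _ ?_ PySem.Dict.empty]
  · rfl
  · rintro ⟨p1, p2⟩ hp
    rcases List.of_mem_zip hp with ⟨h1, h2⟩
    exact ⟨mem_pvAlf.mpr h1, mem_pvAlf.mpr (List.mem_of_mem_drop h2)⟩
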